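-- pv_equiv track=rewrite | github.com/kkobug/algorithm_study | programmers/코드챌린지/110 옮기기.py | solution
-- ===== SOURCE A (Python) =====
-- def solution(s):
--     answer = []
--     for number in s:
--         removed_list = []
--         moved_list = []
--         for i in number:
--             removed_list.append(i)
--             if len(removed_list) < 3:
--                 continue
--
--             if removed_list[-1] == "0" and removed_list[-2] == "1" and removed_list[-3] == "1":
--                 del removed_list[-3:]
--                 moved_list.append("110")
--
--         mid_point = 0
--         for i in range(len(removed_list)-1, -1, -1):
--             if removed_list[i] == "0":
--                 mid_point = i+1
--                 break
--         answer.append("".join(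
--             removed_list[:mid_point] + moved_list + removed_list[mid_point:]
--         ))
--     return answer
-- ===== SOURCE B (Python) =====
-- def solution(s):
--     answer = []
--     for number in s:
--         reduced = number
--         count = 0
--         while '110' in reduced:
--             reduced = reduced.replace('110', '', 1)
--             count += 1
--         cut = reduced.rfind('0') + 1
--         answer.append(reduced[:cut] + '110' * count + reduced[cut:])
--     return answer
-- ===== Notes on version B (the rewrite author's own statement) =====
-- stated objective: idiomatic
-- what changed: Replaces the manual stack with guarded negative indexing and the backward index scan by repeated removal of the leftmost '110' occurrence until none remains (counting removals) plus an rfind-based splice after the last '0'.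
import Mathlib
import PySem

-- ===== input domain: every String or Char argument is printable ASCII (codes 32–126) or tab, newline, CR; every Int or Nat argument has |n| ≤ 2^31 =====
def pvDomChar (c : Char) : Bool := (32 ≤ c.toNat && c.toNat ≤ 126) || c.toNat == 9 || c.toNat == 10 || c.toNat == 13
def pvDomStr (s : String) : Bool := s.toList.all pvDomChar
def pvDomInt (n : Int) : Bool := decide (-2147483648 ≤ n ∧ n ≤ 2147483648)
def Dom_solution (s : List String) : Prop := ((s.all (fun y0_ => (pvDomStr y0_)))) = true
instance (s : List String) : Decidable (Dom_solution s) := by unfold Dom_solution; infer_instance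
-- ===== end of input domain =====

-- B replaces A's manual stack + backward scan by repeated removal of the leftmost "110"
-- occurrence (counting removals) plus an rfind-based splice after the last '0'; idiomatic, not faster.

-- ===== PORT A =====
-- one iteration of A's inner loop: push the char, then pop a trailing "110" onto moved_list
def stepA (st : List Char × List String) (c : Char) : List Char × List String :=
  let r := st.1 ++ [c]
  if r.length < 3 then (r, st.2)
  else if PySem.List.pyGetD r (-1) ' ' = '0' ∧ PySem.List.pyGetD r (-2) ' ' = '1'
          ∧ PySem.List.pyGetD r (-3) ' ' = '1' then
    (PySem.List.slice r none (some (-3)), st.2 ++ ["110"])   -- del removed_list[-3:]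
  else (r, st.2)

-- A's 'for i in range(len-1,-1,-1): if removed_list[i]=="0": mid=i+1; break' (mid stays 0)
def midA (r : List Char) : List Int → Int
  | [] => 0
  | i :: rest => if PySem.List.pyGetD r i ' ' = '0' then i + 1 else midA r rest

def solution (s : List String) : List String :=
  s.map (fun number =>
    let st := number.toList.foldl stepA ([], [])
    let mid := midA st.1 (PySem.List.pyRange ((st.1.length : Int) - 1) (-1) (-1))
    -- "".join of (chars ++ moved strings ++ chars), ported as flattening to chars
    String.ofList (PySem.List.slice st.1 none (some mid)
               ++ (st.2.map String.toList).flatten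
               ++ PySem.List.slice st.1 (some mid) none))

-- ===== PORT B =====
-- leftmost occurrence of "110": Source B's `'110' in reduced` / `reduced.replace('110','',1)`,
-- ported by hand as a split at the first occurrence (exact: Python replace scans left to right)
def split110 : List Char → Option (List Char × List Char)
  | [] => none
  | c :: rest =>
    if c = '1' ∧ rest.take 2 = ['1', '0'] then some ([], rest.drop 2)
    else (split110 rest).map (fun p => (c :: p.1, p.2))

theorem split110_some_eq {cs u v : List Char} (h : split110 cs = some (u, v)) :
    cs = u ++ '1' :: '1' :: '0' :: v := by
  induction cs generalizing u with
  | nil => simp [split110] at h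
  | cons c rest ih =>
    rw [split110] at h
    split_ifs at h with hc
    · obtain ⟨hc1, hc2⟩ := hc
      simp only [Option.some.injEq, Prod.mk.injEq] at h
      obtain ⟨hu, hv⟩ := h
      subst hu hc1
      have htd : rest = rest.take 2 ++ rest.drop 2 := (List.take_append_drop 2 rest).symm
      subst hv
      rw [hc2] at htd
      nth_rewrite 1 [htd]
      simp
    · cases hrec : split110 rest with
      | none => simp [hrec] at h
      | some p =>
        simp only [hrec, Option.map_some, Option.some.injEq, Prod.mk.injEq] at h
        obtain ⟨hu, hv⟩ := h
        rw [← hu]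
        have := ih (u := p.1) (by rw [hrec, ← hv])
        simp [this]

-- Source B's while loop: remove leftmost '110' until none remains, counting removals
def reduceLoop (cs : List Char) : List Char × Nat :=
  match h : split110 cs with
  | none => (cs, 0)
  | some (u, v) =>
      let p := reduceLoop (u ++ v)
      (p.1, p.2 + 1)
termination_by cs.length
decreasing_by
  have := split110_some_eq h
  subst this
  simp
  omega

-- reduced.rfind('0') : index of the last '0', -1 if none
def rfind0 : List Char → Int
  | [] => -1
  | c :: rest =>
    let t := rfind0 rest
    if t = -1 then (if c = '0' then 0 else -1) else t + 1

-- '110' * count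
def rep110 : Nat → List Char
  | 0 => []
  | k + 1 => '1' :: '1' :: '0' :: rep110 k

def solution_alt (s : List String) : List String :=
  s.map (fun number =>
    let p := reduceLoop number.toList
    let cut := rfind0 p.1 + 1
    String.ofList (PySem.List.slice p.1 none (some cut)
               ++ rep110 p.2
               ++ PySem.List.slice p.1 (some cut) none))

-- ===== PRECONDITION & SPEC =====
def Spec_solution (s : List String) (out : List String) : Prop := out = solution_alt s
instance (s : List String) (out : List String) : Decidable (Spec_solution s out) := by unfold Spec_solution; infer_instance

-- ===== CLAIM (what is proved, stated in full; the proofs are below) =====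
def Claim_equal_solution : Prop := ∀ (s : List String), Dom_solution s → Spec_solution s (solution s)

-- ===== LEMMAS AND PROOFS =====

-- counting variant of A's inner loop (stack, number of deletions)
def stepC (st : List Char × Nat) (c : Char) : List Char × Nat :=
  if (st.1 ++ [c]).length < 3 then (st.1 ++ [c], st.2)
  else if PySem.List.pyGetD (st.1 ++ [c]) (-1) ' ' = '0' ∧ PySem.List.pyGetD (st.1 ++ [c]) (-2) ' ' = '1'
          ∧ PySem.List.pyGetD (st.1 ++ [c]) (-3) ' ' = '1' then
    (PySem.List.slice (st.1 ++ [c]) none (some (-3)), st.2 + 1)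
  else (st.1 ++ [c], st.2)

theorem shiftC (cs : List Char) : ∀ (S : List Char) (k : Nat),
    cs.foldl stepC (S, k) = ((cs.foldl stepC (S, 0)).1, k + (cs.foldl stepC (S, 0)).2) := by
  induction cs with
  | nil => intro S k; simp
  | cons c cs ih =>
    intro S k
    have hstep : stepC (S, k) c = ((stepC (S, 0) c).1, k + (stepC (S, 0) c).2) := by
      simp only [stepC]; split_ifs <;> rfl
    rcases hsc : stepC (S, 0) c with ⟨X, m⟩
    rw [List.foldl_cons, List.foldl_cons, hstep, hsc, ih X (k + m), ih X m, Nat.add_assoc]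

theorem foldAC (cs : List Char) : ∀ (S : List Char) (M : List String),
    cs.foldl stepA (S, M)
      = ((cs.foldl stepC (S, 0)).1, M ++ List.replicate (cs.foldl stepC (S, 0)).2 "110") := by
  induction cs with
  | nil => intro S M; simp
  | cons c cs ih =>
    intro S M
    rw [List.foldl_cons, List.foldl_cons]
    by_cases h1 : (S ++ [c]).length < 3
    · have ha : stepA (S, M) c = (S ++ [c], M) := by simp only [stepA]; rw [if_pos h1]
      have hc : stepC (S, 0) c = (S ++ [c], 0) := by simp only [stepC]; rw [if_pos h1]
      rw [ha, hc, ih]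
    · by_cases h2 : PySem.List.pyGetD (S ++ [c]) (-1) ' ' = '0'
          ∧ PySem.List.pyGetD (S ++ [c]) (-2) ' ' = '1' ∧ PySem.List.pyGetD (S ++ [c]) (-3) ' ' = '1'
      · have ha : stepA (S, M) c = (PySem.List.slice (S ++ [c]) none (some (-3)), M ++ ["110"]) := by
          simp only [stepA]; rw [if_neg h1, if_pos h2]
        have hc : stepC (S, 0) c = (PySem.List.slice (S ++ [c]) none (some (-3)), 1) := by
          simp only [stepC]; rw [if_neg h1, if_pos h2]
        rw [ha, hc, ih, shiftC cs (PySem.List.slice (S ++ [c]) none (some (-3))) 1]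
        simp only [Prod.mk.injEq, List.append_assoc, List.singleton_append]
        refine ⟨by trivial, ?_⟩
        rw [Nat.add_comm, List.replicate_succ]
      · have ha : stepA (S, M) c = (S ++ [c], M) := by simp only [stepA]; rw [if_neg h1, if_neg h2]
        have hc : stepC (S, 0) c = (S ++ [c], 0) := by simp only [stepC]; rw [if_neg h1, if_neg h2]
        rw [ha, hc, ih]

theorem stepC_one (S : List Char) (k : Nat) : stepC (S, k) '1' = (S ++ ['1'], k) := by
  simp only [stepC]
  split_ifs with h1 h2
  · rfl
  · exfalso
    have := h2.1
    rw [PySem.List.pyGetD_neg_one_append_singleton] at this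
    simp at this
  · rfl

theorem stepC_pop (S : List Char) (k : Nat) : stepC (S ++ ['1', '1'], k) '0' = (S, k + 1) := by
  have hr : (S ++ ['1', '1']) ++ ['0'] = S ++ ['1', '1', '0'] := by simp
  have hlen : (S ++ ['1', '1', '0']).length = S.length + 3 := by simp
  simp only [stepC, hr]
  rw [if_neg (by omega)]
  rw [if_pos ?_]
  · rw [PySem.List.slice_to_neg_ofNat _ 3 (by omega)]
    have h3 : (S ++ ['1', '1', '0']).length - 3 = S.length := by omega
    rw [h3, List.take_left' rfl]
  · refine ⟨?_, ?_, ?_⟩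
    · rw [← hr, PySem.List.pyGetD_neg_one_append_singleton]
    · rw [PySem.List.pyGetD_neg_ofNat _ 2 ' ' (by omega) (by omega)]
      have : ∀ (i : Nat) (h : i < (S ++ ['1', '1', '0']).length), i = S.length + 1 →
          (S ++ ['1', '1', '0'])[i] = '1' := by
        intro i h hi
        subst hi
        rw [List.getElem_append_right (by omega)]
        simp
      exact this _ (by omega) (by omega)
    · rw [PySem.List.pyGetD_neg_ofNat _ 3 ' ' (by omega) (by omega)]
      have : ∀ (i : Nat) (h : i < (S ++ ['1', '1', '0']).length), i = S.length →
          (S ++ ['1', '1', '0'])[i] = '1' := by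
        intro i h hi
        subst hi
        rw [List.getElem_append_right (by omega)]
        simp
      exact this _ (by omega) (by omega)

def No110 (cs : List Char) : Prop := ∀ u v : List Char, cs ≠ u ++ '1' :: '1' :: '0' :: v

theorem split110_none {cs : List Char} (h : split110 cs = none) : No110 cs := by
  induction cs with
  | nil => intro u v heq; cases u <;> simp at heq
  | cons c rest ih =>
    rw [split110] at h
    split_ifs at h with hc
    have hrest : split110 rest = none := by
      cases hr : split110 rest with
      | none => rfl
      | some p => rw [hr] at h; simp at h
    intro u v heq
    cases u with
    | nil =>
      simp at heq
      exact hc ⟨heq.1, by rw [heq.2]; rfl⟩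
    | cons a u' =>
      simp at heq
      exact ih hrest u' v heq.2

theorem foldC_no110 {cs : List Char} (h : No110 cs) : cs.foldl stepC ([], 0) = (cs, 0) := by
  induction cs using List.reverseRecOn with
  | nil => rfl
  | append_singleton ys c ih =>
    have hys : No110 ys := by
      intro u v heq
      exact h u (v ++ [c]) (by rw [heq]; simp)
    rw [List.foldl_append, ih hys]
    show stepC (ys, 0) c = (ys ++ [c], 0)
    simp only [stepC]
    split_ifs with h1 h2
    · rfl
    · exfalso
      obtain ⟨e1, e2, e3⟩ := h2
      have hlen : 3 ≤ (ys ++ [c]).length := by omega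
      set r := ys ++ [c] with hrdef
      have hn : r.length = ys.length + 1 := by simp [hrdef]
      have g1 : r[r.length - 1] = '0' := by
        rw [PySem.List.pyGetD_neg_ofNat r 1 ' ' (by omega) (by omega)] at e1
        exact e1
      have g2 : r[r.length - 2] = '1' := by
        rw [PySem.List.pyGetD_neg_ofNat r 2 ' ' (by omega) (by omega)] at e2
        exact e2
      have g3 : r[r.length - 3] = '1' := by
        rw [PySem.List.pyGetD_neg_ofNat r 3 ' ' (by omega) (by omega)] at e3
        exact e3
      have hd : r.drop (r.length - 3) = ['1', '1', '0'] := by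
        rw [List.drop_eq_getElem_cons (by omega)]
        rw [show r.length - 3 + 1 = r.length - 2 by omega]
        rw [List.drop_eq_getElem_cons (by omega)]
        rw [show r.length - 2 + 1 = r.length - 1 by omega]
        rw [List.drop_eq_getElem_cons (by omega)]
        rw [show r.length - 1 + 1 = r.length by omega, List.drop_length]
        rw [g1, g2, g3]
      have : r = r.take (r.length - 3) ++ '1' :: '1' :: '0' :: [] := by
        conv_lhs => rw [← List.take_append_drop (r.length - 3) r]
        rw [hd]
      exact h _ _ this
    · rfl

theorem foldC_split (u v S : List Char) (k : Nat) :
    (u ++ '1' :: '1' :: '0' :: v).foldl stepC (S, k)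
      = (((u ++ v).foldl stepC (S, k)).1, ((u ++ v).foldl stepC (S, k)).2 + 1) := by
  rw [show u ++ '1' :: '1' :: '0' :: v = u ++ ['1', '1', '0'] ++ v by simp]
  conv_lhs => rw [List.foldl_append, List.foldl_append]
  conv_rhs => rw [List.foldl_append]
  rcases h1 : List.foldl stepC (S, k) u with ⟨S1, k1⟩
  have : (['1', '1', '0'] : List Char).foldl stepC (S1, k1) = (S1, k1 + 1) := by
    show stepC (stepC (stepC (S1, k1) '1') '1') '0' = (S1, k1 + 1)
    rw [stepC_one, stepC_one, show (S1 ++ ['1']) ++ ['1'] = S1 ++ ['1', '1'] by simp, stepC_pop]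
  rw [this, shiftC v S1 (k1 + 1), shiftC v S1 k1]
  simp [Nat.add_assoc, Nat.add_comm 1]

theorem reduceLoop_eq (cs : List Char) : reduceLoop cs = cs.foldl stepC ([], 0) := by
  induction cs using reduceLoop.induct with
  | case1 cs h =>
    rw [reduceLoop]
    rw [h]
    exact (foldC_no110 (split110_none h)).symm
  | case2 cs u v h ih =>
    rw [reduceLoop]
    rw [h]
    simp only
    rw [split110_some_eq h, foldC_split, ih]

theorem rfind0_snoc (ys : List Char) (c : Char) :
    rfind0 (ys ++ [c]) = if c = '0' then (ys.length : Int) else rfind0 ys := by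
  induction ys with
  | nil =>
    simp only [List.nil_append, rfind0]
    split_ifs <;> simp
  | cons y ys ih =>
    simp only [List.cons_append, rfind0, ih]
    by_cases hc : c = '0'
    · simp only [if_pos hc]
      rw [if_neg (show ¬((ys.length : Int) = -1) by omega)]
      simp
    · simp only [if_neg hc]

theorem midA_snoc_irrel (ys : List Char) (c : Char) (a : Int) (h : a < (ys.length : Int)) :
    midA (ys ++ [c]) (PySem.List.pyRange a (-1) (-1)) = midA ys (PySem.List.pyRange a (-1) (-1)) := by
  by_cases ha : a ≤ -1
  · rw [PySem.List.pyRange_neg_one_eq_nil ha]; rfl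
  · push Not at ha
    rw [PySem.List.pyRange_neg_one_cons ha]
    have hget : PySem.List.pyGetD (ys ++ [c]) a ' ' = PySem.List.pyGetD ys a ' ' := by
      rw [PySem.List.pyGetD_eq_getElem (ys ++ [c]) ' ' (by omega) (by simp; omega),
          PySem.List.pyGetD_eq_getElem ys ' ' (by omega) h]
      exact List.getElem_append_left (by omega)
    rw [midA, midA, hget]
    split_ifs with h0
    · rfl
    · exact midA_snoc_irrel ys c (a - 1) (by omega)
termination_by (a + 1).toNat
decreasing_by omega

theorem midA_eq_rfind (r : List Char) :
    midA r (PySem.List.pyRange ((r.length : Int) - 1) (-1) (-1)) = rfind0 r + 1 := by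
  induction r using List.reverseRecOn with
  | nil => rw [PySem.List.pyRange_neg_one_eq_nil (by simp)]; rfl
  | append_singleton ys c ih =>
    have hlen : ((ys ++ [c]).length : Int) - 1 = (ys.length : Int) := by simp
    rw [hlen, PySem.List.pyRange_neg_one_cons (by omega), midA]
    have hget : PySem.List.pyGetD (ys ++ [c]) (ys.length : Int) ' ' = c := by
      rw [PySem.List.pyGetD_eq_getElem (ys ++ [c]) ' ' (by omega) (by simp)]
      simp
    rw [hget, rfind0_snoc]
    by_cases hc : c = '0'
    · rw [if_pos hc, if_pos hc]
    · rw [if_neg hc, if_neg hc, midA_snoc_irrel ys c _ (by omega)]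
      rw [show (ys.length : Int) - 1 = ((ys.length : Int) - 1) from rfl]
      exact ih

theorem flat_rep (k : Nat) :
    ((List.replicate k "110").map String.toList).flatten = rep110 k := by
  induction k with
  | zero => rfl
  | succ k ih =>
    rw [List.replicate_succ, List.map_cons, List.flatten_cons, ih]
    rfl

theorem main_lemma : ∀ number : String,
    (let st := number.toList.foldl stepA ([], [])
     let mid := midA st.1 (PySem.List.pyRange ((st.1.length : Int) - 1) (-1) (-1))
     String.ofList (PySem.List.slice st.1 none (some mid)
               ++ (st.2.map String.toList).flatten
               ++ PySem.List.slice st.1 (some mid) none))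
    = (let p := reduceLoop number.toList
       let cut := rfind0 p.1 + 1
       String.ofList (PySem.List.slice p.1 none (some cut)
               ++ rep110 p.2
               ++ PySem.List.slice p.1 (some cut) none)) := by
  intro number
  simp only [foldAC number.toList [] [], reduceLoop_eq, List.nil_append,
             midA_eq_rfind, flat_rep]

-- ===== VERDICT (by name: the statement is the Claim_ definition above) =====
theorem solution_spec : Claim_equal_solution := by
  intro s _
  unfold Spec_solution solution solution_alt
  exact List.map_congr_left (fun number _ => main_lemma number)
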